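-- pv_equiv track=rewrite | github.com/KurmaevAmir/Preparation_for_the_EGE | Task 23/solution_5543.py | function
-- ===== SOURCE A (Python) =====
-- def function(n, k, m):
--     if n > k:
--         return 0
--     if n == k:
--         return 1
--     else:
--         if n % 2 != 0:
--             m += 1
--             if m != 2:
--                 return function(n + 2, k, m) + function(n * 3, k, m) + function(n * 4, k, m)
--             else:
--                 return 0
--         else:
--             m = 0
--             return function(n + 2, k, m) + function(n * 3, k, m) + function(n * 4, k, m)
-- ===== SOURCE B (Python) =====
-- def function(n, k, m):
--     # memoized on (value, capped state): all states >= 2 behave identically,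
--     # since the only pruning test is state == 2 right after an increment
--     memo = {}
--
--     def count(v, s):
--         if v > k:
--             return 0
--         if v == k:
--             return 1
--         if v % 2 != 0:
--             if s == 1:
--                 return 0
--             s = min(s + 1, 2)
--         else:
--             s = 0
--         key = (v, s)
--         if key not in memo:
--             memo[key] = count(v + 2, s) + count(v * 3, s) + count(v * 4, s)
--         return memo[key]
--
--     return count(n, m)
-- ===== Notes on version B (the rewrite author's own statement) =====
-- stated objective: faster
-- what changed: A's plain triple recursion over (value, state) is replaced by recursion memoized on (value, capped state) — states >= 2 are provably interchangeable, so each distinct (value, state) pair is expanded once instead of exponentially many times.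
import Mathlib
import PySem

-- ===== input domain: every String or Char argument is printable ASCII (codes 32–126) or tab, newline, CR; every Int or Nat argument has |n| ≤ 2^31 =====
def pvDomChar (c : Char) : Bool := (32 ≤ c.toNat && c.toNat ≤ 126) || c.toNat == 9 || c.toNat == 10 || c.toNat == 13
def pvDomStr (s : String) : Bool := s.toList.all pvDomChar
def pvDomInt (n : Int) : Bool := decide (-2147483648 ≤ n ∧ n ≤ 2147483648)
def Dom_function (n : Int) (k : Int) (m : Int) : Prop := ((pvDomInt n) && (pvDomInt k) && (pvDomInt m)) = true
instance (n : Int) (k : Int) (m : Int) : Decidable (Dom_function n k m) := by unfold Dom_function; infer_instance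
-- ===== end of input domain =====

-- B replaces A's plain triple recursion by recursion memoized on (value, capped state);
-- objective: faster on inputs with large k - n.

-- ===== PORT A =====
-- literal port of A; the fuel argument only makes the recursion total in Lean
-- (on every input admitted by Pre_function the fuel is never exhausted: see goA_fuel_irrel)
def goA : Nat → Int → Int → Int → Int
  | 0, _, _, _ => 0
  | fuel+1, n, k, m =>
    if n > k then 0
    else if n = k then 1
    else if PySem.Int.mod n 2 ≠ 0 then
      if m + 1 ≠ 2 then
        goA fuel (n+2) k (m+1) + goA fuel (n*3) k (m+1) + goA fuel (n*4) k (m+1)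
      else 0
    else
      goA fuel (n+2) k 0 + goA fuel (n*3) k 0 + goA fuel (n*4) k 0

def function (n : Int) (k : Int) (m : Int) : Int :=
  goA ((k - n).toNat + 1) n k m

-- ===== PORT B =====
-- literal port of Source B's memoized count; fuel as above, memo threaded through the state
def goB : Nat → Int → Int → Int → PySem.Dict (Int × Int) Int → Int × PySem.Dict (Int × Int) Int
  | 0, _, _, _, memo => (0, memo)
  | fuel+1, v, s, k, memo =>
    if v > k then (0, memo)
    else if v = k then (1, memo)
    else
      -- the state update of Source B: none = the early `return 0` on s == 1 at an odd v
      let s? : Option Int :=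
        if PySem.Int.mod v 2 ≠ 0 then (if s = 1 then none else some (min (s+1) 2)) else some 0
      match s? with
      | none => (0, memo)
      | some s' =>
        match PySem.Dict.get? memo (v, s') with
        | some x => (x, memo)
        | none =>
          let r1 := goB fuel (v+2) s' k memo
          let r2 := goB fuel (v*3) s' k r1.2
          let r3 := goB fuel (v*4) s' k r2.2
          let total := r1.1 + r2.1 + r3.1
          (total, PySem.Dict.insert r3.2 (v, s') total)

def function_alt (n : Int) (k : Int) (m : Int) : Int :=
  (goB ((k - n).toNat + 1) n m k (PySem.Dict.mk [])).1

-- ===== PRECONDITION & SPEC =====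
-- Pre_ excludes n ≤ 0 with n < k, where A's recursion never terminates (Python RecursionError)
def Pre_function (n : Int) (k : Int) (m : Int) : Prop := 1 ≤ n ∨ k ≤ n
instance (n : Int) (k : Int) (m : Int) : Decidable (Pre_function n k m) := by
  unfold Pre_function; infer_instance

def pvWitness_function : Int × Int × Int := (1, 9, 0)

def Spec_function (n : Int) (k : Int) (m : Int) (out : Int) : Prop := out = function_alt n k m
instance (n : Int) (k : Int) (m : Int) (out : Int) : Decidable (Spec_function n k m out) := by
  unfold Spec_function; infer_instance

-- ===== CLAIM (what is proved, stated in full; the proofs are below) =====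
def Claim_equal_function : Prop :=
  ∀ (n : Int) (k : Int) (m : Int), Dom_function n k m → Pre_function n k m →
    Spec_function n k m (function n k m)

-- ===== LEMMAS AND PROOFS =====

-- A's value depends on the state only through the test `m + 1 = 2`;
-- all states ≥ 2 are interchangeable.
theorem goA_state_irrel (fuel : Nat) : ∀ (v k s t : Int), 2 ≤ s → 2 ≤ t →
    goA fuel v k s = goA fuel v k t := by
  induction fuel with
  | zero => intro v k s t _ _; rfl
  | succ fuel ih =>
    intro v k s t hs ht
    simp only [goA]
    split
    · rfl
    split
    · rfl
    split
    · rw [if_pos (show s + 1 ≠ 2 by omega), if_pos (show t + 1 ≠ 2 by omega),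
        ih (v+2) k (s+1) (t+1) (by omega) (by omega),
        ih (v*3) k (s+1) (t+1) (by omega) (by omega),
        ih (v*4) k (s+1) (t+1) (by omega) (by omega)]
    · rfl

-- with enough fuel (more than (k - v).toNat, for 1 ≤ v) the fuel does not matter
theorem goA_fuel_irrel (f1 : Nat) : ∀ (f2 : Nat) (v k s : Int), 1 ≤ v →
    (k - v).toNat < f1 → (k - v).toNat < f2 → goA f1 v k s = goA f2 v k s := by
  induction f1 with
  | zero => intro f2 v k s _ h1 _; omega
  | succ f1 ih =>
    intro f2 v k s hv h1 h2
    match f2 with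
    | 0 => omega
    | f2+1 =>
      simp only [goA]
      split
      · rfl
      split
      · rfl
      rename_i hgt heq
      have hvk : v < k := by omega
      split
      · split
        · rw [ih f2 (v+2) k _ (by omega) (by omega) (by omega),
            ih f2 (v*3) k _ (by omega) (by omega) (by omega),
            ih f2 (v*4) k _ (by omega) (by omega) (by omega)]
        · rfl
      · rw [ih f2 (v+2) k _ (by omega) (by omega) (by omega),
          ih f2 (v*3) k _ (by omega) (by omega) (by omega),
          ih f2 (v*4) k _ (by omega) (by omega) (by omega)]

-- the canonical (fuel-free) value of A at a node
def Aval (k v s : Int) : Int := goA ((k - v).toNat + 1) v k s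

-- invariant of the memo table: every stored entry is the sum of A's values at the three children
def InvB (k : Int) (memo : PySem.Dict (Int × Int) Int) : Prop :=
  ∀ (v s x : Int), PySem.Dict.get? memo (v, s) = some x →
    1 ≤ v ∧ x = Aval k (v+2) s + Aval k (v*3) s + Aval k (v*4) s

theorem InvB_empty (k : Int) : InvB k (PySem.Dict.mk []) := by
  intro v s x h
  simp [PySem.Dict.get?] at h

theorem goB_correct (fuel : Nat) : ∀ (v s k : Int) (memo : PySem.Dict (Int × Int) Int),
    1 ≤ v → (k - v).toNat < fuel → InvB k memo →
    (goB fuel v s k memo).1 = goA fuel v k s ∧ InvB k (goB fuel v s k memo).2 := by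
  induction fuel with
  | zero => intro v s k memo _ h _; omega
  | succ fuel ih =>
    intro v s k memo hv hfuel hinv
    simp only [goB, goA]
    split
    · exact ⟨rfl, hinv⟩
    split
    · exact ⟨rfl, hinv⟩
    rename_i hgt heq
    have hvk : v < k := by omega
    -- common continuation, for the normalized state s' and A's child state sa
    have key : ∀ s' sa : Int,
        (∀ (fl : Nat) (w : Int), (k - w).toNat < fl → goA fl w k sa = goA fl w k s') →
        ((match PySem.Dict.get? memo (v, s') with
          | some x => (x, memo)
          | none =>
            let r1 := goB fuel (v+2) s' k memo
            let r2 := goB fuel (v*3) s' k r1.2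
            let r3 := goB fuel (v*4) s' k r2.2
            let total := r1.1 + r2.1 + r3.1
            (total, PySem.Dict.insert r3.2 (v, s') total)) :
            Int × PySem.Dict (Int × Int) Int).1 =
          goA fuel (v+2) k sa + goA fuel (v*3) k sa + goA fuel (v*4) k sa ∧
        InvB k (match PySem.Dict.get? memo (v, s') with
          | some x => (x, memo)
          | none =>
            let r1 := goB fuel (v+2) s' k memo
            let r2 := goB fuel (v*3) s' k r1.2
            let r3 := goB fuel (v*4) s' k r2.2
            let total := r1.1 + r2.1 + r3.1
            (total, PySem.Dict.insert r3.2 (v, s') total)).2 := by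
      intro s' sa e
      have b1 : (k - (v+2)).toNat < fuel := by omega
      have b2 : (k - v*3).toNat < fuel := by omega
      have b3 : (k - v*4).toNat < fuel := by omega
      match hmem : PySem.Dict.get? memo (v, s') with
      | some x =>
        obtain ⟨-, hx⟩ := hinv v s' x hmem
        constructor
        · show x = _
          rw [hx, Aval, Aval, Aval, e fuel (v+2) b1, e fuel (v*3) b2, e fuel (v*4) b3,
            goA_fuel_irrel ((k - (v+2)).toNat + 1) fuel (v+2) k s' (by omega) (by omega) b1,
            goA_fuel_irrel ((k - v*3).toNat + 1) fuel (v*3) k s' (by omega) (by omega) b2,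
            goA_fuel_irrel ((k - v*4).toNat + 1) fuel (v*4) k s' (by omega) (by omega) b3]
        · exact hinv
      | none =>
        obtain ⟨q1, j1⟩ := ih (v+2) s' k memo (by omega) b1 hinv
        obtain ⟨q2, j2⟩ := ih (v*3) s' k (goB fuel (v+2) s' k memo).2 (by omega) b2 j1
        obtain ⟨q3, j3⟩ := ih (v*4) s' k (goB fuel (v*3) s' k (goB fuel (v+2) s' k memo).2).2
          (by omega) b3 j2
        refine ⟨?_, ?_⟩
        · show (goB fuel (v+2) s' k memo).1
            + (goB fuel (v*3) s' k (goB fuel (v+2) s' k memo).2).1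
            + (goB fuel (v*4) s' k (goB fuel (v*3) s' k (goB fuel (v+2) s' k memo).2).2).1 = _
          rw [q1, q2, q3, e fuel (v+2) b1, e fuel (v*3) b2, e fuel (v*4) b3]
        · show InvB k (PySem.Dict.insert
            (goB fuel (v*4) s' k (goB fuel (v*3) s' k (goB fuel (v+2) s' k memo).2).2).2 (v, s')
            ((goB fuel (v+2) s' k memo).1
              + (goB fuel (v*3) s' k (goB fuel (v+2) s' k memo).2).1
              + (goB fuel (v*4) s' k (goB fuel (v*3) s' k (goB fuel (v+2) s' k memo).2).2).1))
          intro w t x hget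
          rw [PySem.Dict.get?_insert] at hget
          by_cases hwt : ((w, t) : Int × Int) = (v, s')
          · rw [if_pos hwt] at hget
            injection hwt with hw ht
            rw [hw, ht]
            refine ⟨hv, ?_⟩
            rw [← Option.some.inj hget, q1, q2, q3, Aval, Aval, Aval,
              goA_fuel_irrel ((k - (v+2)).toNat + 1) fuel (v+2) k s' (by omega) (by omega) b1,
              goA_fuel_irrel ((k - v*3).toNat + 1) fuel (v*3) k s' (by omega) (by omega) b2,
              goA_fuel_irrel ((k - v*4).toNat + 1) fuel (v*4) k s' (by omega) (by omega) b3]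
          · rw [if_neg hwt] at hget
            exact j3 w t x hget
    by_cases hodd : PySem.Int.mod v 2 ≠ 0
    · -- odd value
      simp only [if_pos hodd]
      by_cases hs1 : s = 1
      · simp only [if_pos hs1, if_neg (show ¬ s + 1 ≠ 2 by omega)]
        exact ⟨trivial, hinv⟩
      · simp only [if_neg hs1, if_pos (show s + 1 ≠ 2 by omega)]
        by_cases hs2 : s + 1 < 2
        · rw [show min (s+1) 2 = s + 1 by omega]
          exact key (s+1) (s+1) (fun _ _ _ => rfl)
        · rw [show min (s+1) 2 = 2 by omega]
          exact key 2 (s+1)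
            (fun fl w _ => goA_state_irrel fl w k (s+1) 2 (by omega) (by omega))
    · -- even value
      simp only [if_neg hodd]
      exact key 0 0 (fun _ _ _ => rfl)

-- ===== VERDICT (by name: the statement is the Claim_ definition above) =====
theorem function_spec : Claim_equal_function := by
  intro n k m _ hpre
  unfold Spec_function function function_alt
  by_cases hn : 1 ≤ n
  · exact ((goB_correct _ n m k _ hn (by omega) (InvB_empty k)).1).symm
  · -- then k ≤ n, hence n > k or n = k: both sides return immediately
    have hk : k ≤ n := by rcases hpre with h | h <;> omega
    by_cases hnk : n = k
    · subst hnk; simp [goA, goB]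
    · have : n > k := by omega
      simp [goA, goB, this]
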